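-- pv_equiv track=rewrite | github.com/pushpa-info-14/python-programming | LeetCode/3750-4000/Q3839 Number of Prefix Connected Groups.py | prefixConnected
-- ===== SOURCE A (Python) =====
-- from collections import defaultdict
-- from typing import List
--
-- def prefixConnected(words: List[str], k: int) -> int:
--     mp = defaultdict(int)
--     for word in words:
--         if len(word) >= k:
--             mp[word[:k]] += 1
--     res = 0
--     for val in mp.values():
--         if val >= 2:
--             res += 1
--     return res
-- ===== SOURCE B (Python) =====
-- def prefixConnected(words, k):
--     ps = sorted(w[:k] for w in words if len(w) >= k)
--     res = 0
--     i = 0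
--     n = len(ps)
--     while i < n:
--         j = i + 1
--         while j < n and ps[j] == ps[i]:
--             j += 1
--         if j - i >= 2:
--             res += 1
--         i = j
--     return res
-- ===== Notes on version B (the rewrite author's own statement) =====
-- stated objective: alternative
-- what changed: Replaces the hash-counter dictionary with sort-then-adjacent-run-counting: build the list of k-prefixes, sort it, and count maximal runs of length >= 2.
import Mathlib
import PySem

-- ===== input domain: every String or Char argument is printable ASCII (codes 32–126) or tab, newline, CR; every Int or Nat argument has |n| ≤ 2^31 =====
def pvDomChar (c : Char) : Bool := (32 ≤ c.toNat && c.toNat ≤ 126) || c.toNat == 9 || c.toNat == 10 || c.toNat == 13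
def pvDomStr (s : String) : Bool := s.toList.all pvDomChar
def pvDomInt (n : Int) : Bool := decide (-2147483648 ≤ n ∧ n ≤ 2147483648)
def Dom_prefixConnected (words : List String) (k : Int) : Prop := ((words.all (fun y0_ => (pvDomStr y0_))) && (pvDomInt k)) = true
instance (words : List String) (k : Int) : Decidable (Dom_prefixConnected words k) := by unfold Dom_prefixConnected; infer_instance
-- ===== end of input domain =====

-- B replaces A's hash-counter dictionary by sort-then-adjacent-run-counting (alternative decomposition, similar cost).

-- ===== PORT A =====
-- literal port of A: defaultdict counting loop, then count values ≥ 2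
def prefixConnected (words : List String) (k : Int) : Int :=
  let mp : PySem.Dict String Int := words.foldl
    (fun mp word =>
      if k ≤ PySem.Str.len word then mp.modify (PySem.Str.slice word none (some k)) 0 (· + 1) else mp)
    PySem.Dict.empty
  mp.values.foldl (fun res val => if 2 ≤ val then res + 1 else res) 0

-- ===== PORT B =====
-- the outer while loop of Source B: the inner while collects the run (takeWhile), i jumps to j (dropWhile)
def pvRuns : List String → Int
  | [] => 0
  | p :: rest =>
    (if 2 ≤ (rest.takeWhile (fun q => q == p)).length + 1 then (1 : Int) else 0)
      + pvRuns (rest.dropWhile (fun q => q == p))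
termination_by l => l.length
decreasing_by
  simp only [List.length_cons]
  exact Nat.lt_succ_of_le (List.length_dropWhile_le _ _)

def prefixConnected_alt (words : List String) (k : Int) : Int :=
  let ps := PySem.List.sorted
    ((words.filter (fun w => k ≤ PySem.Str.len w)).map (fun w => PySem.Str.slice w none (some k)))
    (fun x => x) false
  pvRuns ps

-- ===== PRECONDITION & SPEC =====
def Spec_prefixConnected (words : List String) (k : Int) (out : Int) : Prop := out = prefixConnected_alt words k
instance (words : List String) (k : Int) (out : Int) : Decidable (Spec_prefixConnected words k out) := by unfold Spec_prefixConnected; infer_instance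

-- ===== CLAIM (what is proved, stated in full; the proofs are below) =====
def Claim_equal_prefixConnected : Prop := ∀ (words : List String) (k : Int), Dom_prefixConnected words k → Spec_prefixConnected words k (prefixConnected words k)

-- ===== LEMMAS AND PROOFS =====

-- A's guarded counting loop over words = the plain counting loop over the filtered+mapped prefix list
theorem pvFoldGuard (c : String → Prop) [DecidablePred c] (f : String → String)
    (words : List String) (d : PySem.Dict String Int) :
    words.foldl (fun mp w => if c w then mp.modify (f w) 0 (· + 1) else mp) d
      = ((words.filter (fun w => decide (c w))).map f).foldl (fun mp x => mp.modify x 0 (· + 1)) d := by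
  induction words generalizing d with
  | nil => rfl
  | cons w ws ih =>
    by_cases h : c w
    · simp [h, ih]
    · simp [h, ih]

-- the value-counting loop is countP
theorem pvFoldCount (vs : List Int) (r : Int) :
    vs.foldl (fun res v => if 2 ≤ v then res + 1 else res) r
      = r + (vs.countP (fun v => decide (2 ≤ v)) : Int) := by
  induction vs generalizing r with
  | nil => simp
  | cons v vs ih =>
    by_cases h : (2:Int) ≤ v
    · simp [h, ih]; ring
    · simp [h, ih]

-- two nodup lists with the same members have the same countP
theorem pvCountPMemEq (p : String → Bool) (l₁ l₂ : List String)
    (h₁ : l₁.Nodup) (h₂ : l₂.Nodup) (hm : ∀ x, x ∈ l₁ ↔ x ∈ l₂) :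
    l₁.countP p = l₂.countP p :=
  ((List.perm_ext_iff_of_nodup h₁ h₂).2 hm).countP_eq p

-- run counting on a ≤-sorted list counts the distinct elements of multiplicity ≥ 2
theorem pvRunsSorted (l : List String) (hs : l.Pairwise (· ≤ ·)) :
    pvRuns l = ((PySem.List.dedup l).countP (fun x => decide (2 ≤ l.count x)) : Int) := by
  match l, hs with
  | [], _ => simp [pvRuns, PySem.List.dedup]
  | p :: rest, hs =>
    rw [pvRuns]
    set same := rest.takeWhile (fun q => q == p) with hsame
    set t := rest.dropWhile (fun q => q == p) with ht
    have hrest : same ++ t = rest := List.takeWhile_append_dropWhile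
    have hsp : ∀ x ∈ same, x = p := by
      intro x hx
      have := List.mem_takeWhile_imp hx
      simpa using this
    -- every element of t differs from p
    have hpt : ∀ x ∈ t, x ≠ p := by
      cases htt : t with
      | nil => intro x hx; cases hx
      | cons h t' =>
        have hhne' : h ≠ p := by
          have h0 := List.head?_dropWhile_not (fun q => q == p) rest
          rw [← ht, htt] at h0
          simpa using h0
        have hph : p ≤ h := (List.pairwise_cons.1 hs).1 h (by
          rw [← hrest, htt]; exact List.mem_append_right _ List.mem_cons_self)
        have hplt : p < h := lt_of_le_of_ne hph (Ne.symm hhne')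
        have htp : (h :: t').Pairwise (· ≤ ·) := by
          rw [← htt, ht]
          exact List.Pairwise.sublist (List.dropWhile_sublist _) (List.pairwise_cons.1 hs).2
        intro x hx hxe
        rcases List.mem_cons.1 hx with rfl | hx2
        · exact hhne' hxe
        · have hle : h ≤ x := (List.pairwise_cons.1 htp).1 x hx2
          rw [hxe] at hle
          exact absurd hle (not_le.2 hplt)
    have htpair : t.Pairwise (· ≤ ·) :=
      List.Pairwise.sublist (List.dropWhile_sublist _) (List.pairwise_cons.1 hs).2
    have IH := pvRunsSorted t htpair
    -- counts in p :: rest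
    have hcount_p : (p :: rest).count p = same.length + 1 := by
      rw [← hrest, ← List.cons_append, List.count_append]
      have h1 : (p :: same).count p = same.length + 1 := by
        rw [List.count_cons_self]
        have : same.count p = same.length := List.count_eq_length.2 (by
          intro x hx; exact (by simpa using (hsp x hx).symm))
        omega
      have h2 : t.count p = 0 := List.count_eq_zero.2 (by
        intro hmem; exact hpt p hmem rfl)
      omega
    have hcount_ne : ∀ x, x ≠ p → (p :: rest).count x = t.count x := by
      intro x hxp
      rw [← hrest, ← List.cons_append, List.count_append]
      have h1 : (p :: same).count x = 0 := List.count_eq_zero.2 (by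
        intro hmem
        rcases List.mem_cons.1 hmem with h | h
        · exact hxp h
        · exact hxp (hsp x h))
      omega
    -- countP over dedup (p :: rest) = countP over p :: dedup t
    have hswap : (PySem.List.dedup (p :: rest)).countP (fun x => decide (2 ≤ (p :: rest).count x))
        = ((p :: PySem.List.dedup t).countP (fun x => decide (2 ≤ (p :: rest).count x))) := by
      apply pvCountPMemEq
      · exact PySem.List.nodup_dedup _
      · refine List.nodup_cons.2 ⟨?_, PySem.List.nodup_dedup _⟩
        intro hmem
        exact hpt p ((PySem.List.mem_dedup t p).1 hmem) rfl
      · intro x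
        simp only [PySem.List.mem_dedup, List.mem_cons]
        constructor
        · rintro (rfl | h)
          · exact Or.inl rfl
          · rw [← hrest] at h
            rcases List.mem_append.1 h with h | h
            · exact Or.inl (hsp x h)
            · exact Or.inr h
        · rintro (rfl | h)
          · exact Or.inl rfl
          · exact Or.inr (by rw [← hrest]; exact List.mem_append_right _ h)
    rw [hswap, List.countP_cons]
    have hinner : (PySem.List.dedup t).countP (fun x => decide (2 ≤ (p :: rest).count x))
        = (PySem.List.dedup t).countP (fun x => decide (2 ≤ t.count x)) := by
      apply List.countP_congr
      intro x hx
      have hxt : x ∈ t := (PySem.List.mem_dedup t x).1 hx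
      rw [hcount_ne x (hpt x hxt)]
    rw [hinner, IH, hcount_p]
    by_cases hrun : 2 ≤ same.length + 1
    · simp only [decide_eq_true_eq, hrun, if_true]
      push_cast; ring
    · simp only [decide_eq_true_eq, hrun, if_false]
      push_cast; ring
termination_by l.length
decreasing_by
  simp only [List.length_cons]
  exact Nat.lt_succ_of_le (List.length_dropWhile_le _ _)

theorem prefixConnected_eq (words : List String) (k : Int) :
    prefixConnected words k = prefixConnected_alt words k := by
  simp only [prefixConnected, prefixConnected_alt]
  set ps0 := (words.filter (fun w => k ≤ PySem.Str.len w)).map (fun w => PySem.Str.slice w none (some k)) with hps0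
  rw [pvFoldGuard (fun w => k ≤ PySem.Str.len w) (fun w => PySem.Str.slice w none (some k)) words PySem.Dict.empty]
  rw [← PySem.Dict.counter_eq_foldl]
  rw [pvFoldCount]
  -- values of the counter
  have hv : (PySem.Dict.counter ps0).values
      = (PySem.List.dedup ps0).map (fun x => ((ps0.count x : Nat) : Int)) := by
    show ((PySem.Dict.counter ps0).items.map Prod.snd) = _
    rw [PySem.Dict.items_counter]
    simp [List.map_map, Function.comp, List.count]
  set l := PySem.List.sorted ps0 (fun x => x) false with hl
  have hperm : l.Perm ps0 := PySem.List.sorted_perm ps0 (fun x => x) false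
  have hdd : (PySem.List.dedup l).countP (fun x => decide (2 ≤ l.count x))
      = (PySem.List.dedup ps0).countP (fun x => decide (2 ≤ l.count x)) := by
    apply pvCountPMemEq _ _ _ (PySem.List.nodup_dedup _) (PySem.List.nodup_dedup _)
    intro x
    rw [PySem.List.mem_dedup, PySem.List.mem_dedup, hperm.mem_iff]
  rw [hv, List.countP_map]
  rw [pvRunsSorted l (by simpa using PySem.List.sorted_pairwise ps0 (fun x => x)), hdd, zero_add]
  congr 1
  apply List.countP_congr
  intro x hx
  simp only [Function.comp, decide_eq_true_eq]
  rw [hperm.count_eq]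
  exact_mod_cast Iff.rfl

-- ===== VERDICT (by name: the statement is the Claim_ definition above) =====
theorem prefixConnected_spec : Claim_equal_prefixConnected := by
  intro words k _
  unfold Spec_prefixConnected
  exact prefixConnected_eq words k
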